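-- pv_equiv track=rewrite | github.com/ugoertz/l19contest | 6-C/threedigits.py | three_digits_omit25
-- ===== SOURCE A (Python) =====
-- precomputed = [1, 33, 157, 791, 389, 441, 831, 247, 233, 447, 189, ]
--
-- def three_digits_omit25(n):
--
--     q, r = divmod(n, 1000000)
--     lo = q * 1000000 + 1
--     result = precomputed[q]
--     limit = n - (n % 1000)
--
--     for i in range(lo, n+1):
--         if (i % 2) and (i % 5) and i < limit:
--             # those factors cancel with their inverse mod 1000
--             continue
--
--         while i % 2 == 0:
--             i = i // 2
--         while i % 5 == 0:
--             i = i // 5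
--         result = (result * (i % 1000)) % 1000
--
--     return result
-- ===== SOURCE B (Python) =====
-- # B: same result, but the O(10^6) scan over [lo, n] is replaced by an interval recursion:
-- # the product of 2,5-stripped factors over [a,b] mod 1000 splits into the coprime-to-10 part
-- # (full thousand-blocks of which multiply to 1 mod 1000, so only a partial block remains),
-- # the even part (same product over [ceil(a/2), b//2]) and the odd-multiple-of-5 part
-- # (the odd-only product over [ceil(a/5), b//5]); O(log^2 n) block products instead of O(n) steps.
--
-- precomputed = [1, 33, 157, 791, 389, 441, 831, 247, 233, 447, 189, ]
--
-- def _U(a, b):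
--     # product mod 1000 of i % 1000 over i in [a, b] with i coprime to 10;
--     # every 1000 consecutive integers contribute a factor 1, so drop full blocks.
--     L = b - a + 1
--     if L <= 0:
--         return 1
--     if L >= 1000:
--         b = a + L % 1000 - 1
--     r = 1
--     for i in range(a, b + 1):
--         if i % 2 and i % 5:
--             r = r * (i % 1000) % 1000
--     return r
--
-- def three_digits_omit25(n):
--     q = n // 1000000
--     r = precomputed[q]
--     a, b = q * 1000000 + 1, n
--     while a <= b:
--         r = r * _U(a, b) % 1000
--         x, y = (a + 4) // 5, b // 5
--         while x <= y:
--             r = r * _U(x, y) % 1000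
--             x, y = (x + 4) // 5, y // 5
--         a, b = (a + 1) // 2, b // 2
--     return r
-- ===== Notes on version B (the rewrite author's own statement) =====
-- stated objective: faster
-- what changed: A scans every integer in [q*10^6+1, n] stripping 2s and 5s; B keeps the same precomputed table but computes the tail product by an interval recursion - the coprime-to-10 factors of [a,b] reduce to one partial 1000-block product (full blocks multiply to 1 mod 1000), and the even and odd-multiple-of-5 factors are the same product over [ceil(a/2), b//2] and [ceil(a/5), b//5] - so the loop count drops from up to 10^6 to O(log^2 n) block products.
import Mathlib
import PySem

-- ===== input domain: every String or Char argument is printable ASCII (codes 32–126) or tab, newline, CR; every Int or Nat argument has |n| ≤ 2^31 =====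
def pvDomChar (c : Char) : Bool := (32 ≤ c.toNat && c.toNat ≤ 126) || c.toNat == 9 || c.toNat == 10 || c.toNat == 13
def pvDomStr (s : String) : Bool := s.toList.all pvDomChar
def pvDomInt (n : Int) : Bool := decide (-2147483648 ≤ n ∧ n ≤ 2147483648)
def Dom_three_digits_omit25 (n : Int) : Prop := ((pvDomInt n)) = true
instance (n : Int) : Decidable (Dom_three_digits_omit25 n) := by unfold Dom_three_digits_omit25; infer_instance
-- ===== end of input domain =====

set_option maxRecDepth 8000


-- B replaces A's O(n mod 10^6)-step scan of [lo, n] by an O(log^2 n) interval recursion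
-- (coprime-to-10 block products plus halved/fifthed subintervals); equal return values on Pre_.

-- ===== PORT A =====

-- the module constant `precomputed` (shared context of both Source A and Source B)
def pyPrecomputed : List Int := [1, 33, 157, 791, 389, 441, 831, 247, 233, 447, 189]

-- 'while i % 2 == 0: i = i // 2'  (the guard i ≠ 0 only totalises: Python loops forever at 0,
-- and 0 is never reached from the loop range under Pre_)
def strip2 (i : Int) : Int :=
  if _h : i ≠ 0 ∧ PySem.Int.mod i 2 = 0 then strip2 (PySem.Int.floordiv i 2) else i
  termination_by i.natAbs
  decreasing_by
    rw [PySem.Int.floordiv_eq_ediv_of_pos (by norm_num)]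
    have h2 : PySem.Int.mod i 2 = i % 2 := PySem.Int.mod_eq_emod_of_pos (by norm_num)
    omega

-- 'while i % 5 == 0: i = i // 5'
def strip5 (i : Int) : Int :=
  if _h : i ≠ 0 ∧ PySem.Int.mod i 5 = 0 then strip5 (PySem.Int.floordiv i 5) else i
  termination_by i.natAbs
  decreasing_by
    rw [PySem.Int.floordiv_eq_ediv_of_pos (by norm_num)]
    have h5 : PySem.Int.mod i 5 = i % 5 := PySem.Int.mod_eq_emod_of_pos (by norm_num)
    omega

-- literal port of A (the remainder r of divmod is unused in the Python and omitted;
-- precomputed[q] raises IndexError for q outside the table — excluded by Pre_, .getD 0 unreachable there)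
def three_digits_omit25 (n : Int) : Int :=
  let q := PySem.Int.floordiv n 1000000
  let lo := q * 1000000 + 1
  let result := (PySem.List.pyGet? pyPrecomputed q).getD 0
  let limit := n - PySem.Int.mod n 1000
  (PySem.List.pyRange lo (n + 1) 1).foldl
    (fun acc i =>
      if PySem.Int.mod i 2 ≠ 0 ∧ PySem.Int.mod i 5 ≠ 0 ∧ i < limit then acc
      else PySem.Int.mod (acc * PySem.Int.mod (strip5 (strip2 i)) 1000) 1000)
    result

-- ===== PORT B =====

-- _U(a, b): product mod 1000 of i % 1000 over i in [a,b] coprime to 10, full 1000-blocks dropped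
def altU (a b : Int) : Int :=
  let L := b - a + 1
  if L ≤ 0 then 1
  else
    let b' := if 1000 ≤ L then a + PySem.Int.mod L 1000 - 1 else b
    (PySem.List.pyRange a (b' + 1) 1).foldl
      (fun r i =>
        if PySem.Int.mod i 2 ≠ 0 ∧ PySem.Int.mod i 5 ≠ 0
        then PySem.Int.mod (r * PySem.Int.mod i 1000) 1000 else r) 1

-- inner 'while x <= y' loop of Source B (fuel only totalises the while loop)
def altLoop5 : Nat → Int → Int → Int → Int
  | 0, _, _, r => r
  | f + 1, x, y, r =>
    if x ≤ y then
      altLoop5 f (PySem.Int.floordiv (x + 4) 5) (PySem.Int.floordiv y 5)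
        (PySem.Int.mod (r * altU x y) 1000)
    else r

-- outer 'while a <= b' loop of Source B
def altLoop2 : Nat → Int → Int → Int → Int
  | 0, _, _, r => r
  | f + 1, a, b, r =>
    if a ≤ b then
      altLoop2 f (PySem.Int.floordiv (a + 1) 2) (PySem.Int.floordiv b 2)
        (altLoop5 f (PySem.Int.floordiv (a + 4) 5) (PySem.Int.floordiv b 5)
          (PySem.Int.mod (r * altU a b) 1000))
    else r

def three_digits_omit25_alt (n : Int) : Int :=
  let q := PySem.Int.floordiv n 1000000
  let r := (PySem.List.pyGet? pyPrecomputed q).getD 0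
  altLoop2 (2 * n.natAbs + 1000003) (q * 1000000 + 1) n r

-- ===== PRECONDITION & SPEC =====
-- Pre_ is exactly the set of inputs on which the Python A returns normally: outside it
-- n // 10**6 falls outside the 11-entry table (index in [-11, 10]) and A raises IndexError.
def Pre_three_digits_omit25 (n : Int) : Prop := -11000000 ≤ n ∧ n < 11000000
instance (n : Int) : Decidable (Pre_three_digits_omit25 n) := by
  unfold Pre_three_digits_omit25; infer_instance

def pvWitness_three_digits_omit25 : Int := 1234

def Spec_three_digits_omit25 (n : Int) (out : Int) : Prop := out = three_digits_omit25_alt n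
instance (n : Int) (out : Int) : Decidable (Spec_three_digits_omit25 n out) := by
  unfold Spec_three_digits_omit25; infer_instance

-- ===== CLAIM (what is proved, stated in full; the proofs are below) =====
def Claim_equal_three_digits_omit25 : Prop :=
  ∀ (n : Int), Dom_three_digits_omit25 n → Pre_three_digits_omit25 n →
    Spec_three_digits_omit25 n (three_digits_omit25 n)

-- ===== LEMMAS AND PROOFS =====

-- 2,5-free part of a natural number
def remove2 (m : Nat) : Nat :=
  if _h : m ≠ 0 ∧ m % 2 = 0 then remove2 (m / 2) else m
  termination_by m
  decreasing_by omega

def remove5 (m : Nat) : Nat :=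
  if _h : m ≠ 0 ∧ m % 5 = 0 then remove5 (m / 5) else m
  termination_by m
  decreasing_by omega

def redN (m : Nat) : Nat := remove5 (remove2 m)

-- red as an element of ZMod 1000, for either sign
def redZ (i : Int) : ZMod 1000 :=
  if 0 ≤ i then ((redN i.toNat : Nat) : ZMod 1000) else -((redN (-i).toNat : Nat) : ZMod 1000)

def uterm (i : Int) : ZMod 1000 := if i % 2 ≠ 0 ∧ i % 5 ≠ 0 then (i : ZMod 1000) else 1

noncomputable def GG (a b : Int) : ZMod 1000 := ∏ i ∈ Finset.Ico a (b + 1), redZ i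
noncomputable def HH (a b : Int) : ZMod 1000 :=
  ∏ i ∈ Finset.Ico a (b + 1), (if i % 2 ≠ 0 then redZ i else 1)
noncomputable def UU (a b : Int) : ZMod 1000 := ∏ i ∈ Finset.Ico a (b + 1), uterm i

lemma castmod (x : Int) : ((x % 1000 : Int) : ZMod 1000) = (x : ZMod 1000) := by
  have h := Int.mul_ediv_add_emod x 1000
  have h0 : ((1000 : ZMod 1000)) = 0 := by decide
  calc ((x % 1000 : Int) : ZMod 1000)
      = ((1000 * (x / 1000) + x % 1000 : Int) : ZMod 1000) := by push_cast; rw [h0]; ring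
    _ = (x : ZMod 1000) := by rw [h]

lemma int_eq_of_cast_eq {x y : Int} (hx0 : 0 ≤ x) (hx1 : x < 1000) (hy0 : 0 ≤ y)
    (hy1 : y < 1000) (h : (x : ZMod 1000) = (y : ZMod 1000)) : x = y := by
  rw [ZMod.intCast_eq_intCast_iff] at h
  unfold Int.ModEq at h
  omega

lemma prodIco_split (a m b : Int) (h1 : a ≤ m) (h2 : m ≤ b) (f : Int → ZMod 1000) :
    (∏ i ∈ Finset.Ico a m, f i) * ∏ i ∈ Finset.Ico m b, f i = ∏ i ∈ Finset.Ico a b, f i := by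
  rw [← Finset.Ico_union_Ico_eq_Ico h1 h2,
    Finset.prod_union (Finset.Ico_disjoint_Ico_consecutive a m b)]

lemma prodIco_cons (a b : Int) (h : a < b) (f : Int → ZMod 1000) :
    ∏ i ∈ Finset.Ico a b, f i = f a * ∏ i ∈ Finset.Ico (a + 1) b, f i := by
  rw [show Finset.Ico a b = insert a (Finset.Ico (a + 1) b) by
        ext x; simp only [Finset.mem_Ico, Finset.mem_insert]; omega]
  rw [Finset.prod_insert (by simp only [Finset.mem_Ico]; omega)]

-- one block of 1000 consecutive integers: the coprime-to-10 residues multiply to 1 mod 1000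
lemma block_one (c : Int) : ∏ i ∈ Finset.Ico c (c + 1000), uterm i = 1 := by
  have key : ∏ i ∈ Finset.Ico c (c + 1000), uterm i = ∏ j ∈ Finset.Ico (0 : Int) 1000, uterm j := by
    refine Finset.prod_nbij' (fun i => i % 1000) (fun j => c + (j - c) % 1000) ?_ ?_ ?_ ?_ ?_
    · intro i hi; simp only [Finset.mem_Ico] at *; omega
    · intro j hj; simp only [Finset.mem_Ico] at *; omega
    · intro i hi; simp only [Finset.mem_Ico] at hi
      show c + (i % 1000 - c) % 1000 = i; omega
    · intro j hj; simp only [Finset.mem_Ico] at hj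
      show (c + (j - c) % 1000) % 1000 = j; omega
    · intro i _
      unfold uterm
      have h2 : i % 1000 % 2 = i % 2 := by omega
      have h5 : i % 1000 % 5 = i % 5 := by omega
      rw [h2, h5, castmod]
  rw [key]
  decide

lemma blocks (k : Nat) (c : Int) : ∏ i ∈ Finset.Ico c (c + 1000 * (k : Int)), uterm i = 1 := by
  induction k generalizing c with
  | zero => simp
  | succ k ih =>
    have h : c + 1000 * ((k + 1 : Nat) : Int) = (c + 1000) + 1000 * (k : Int) := by push_cast; ring
    rw [h, ← prodIco_split c (c + 1000) ((c + 1000) + 1000 * (k : Int)) (by omega) (by omega)]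
    rw [block_one c, ih (c + 1000)]
    norm_num

-- ===== the fold of B's _U (stated over emod; the port's PySem.Int.mod form is bridged below) =====
lemma foldU_aux : ∀ (k : Nat) (a b s : Int), (b - a).toNat ≤ k → 0 ≤ s → s < 1000 →
    (0 ≤ (PySem.List.pyRange a b 1).foldl
        (fun r i => if i % 2 ≠ 0 ∧ i % 5 ≠ 0 then (r * (i % 1000)) % 1000 else r) s ∧
      (PySem.List.pyRange a b 1).foldl
        (fun r i => if i % 2 ≠ 0 ∧ i % 5 ≠ 0 then (r * (i % 1000)) % 1000 else r) s < 1000) ∧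
    (((PySem.List.pyRange a b 1).foldl
        (fun r i => if i % 2 ≠ 0 ∧ i % 5 ≠ 0 then (r * (i % 1000)) % 1000 else r) s : Int) : ZMod 1000) =
      (s : ZMod 1000) * ∏ i ∈ Finset.Ico a b, uterm i := by
  intro k
  induction k with
  | zero =>
    intro a b s hk h0 h1
    rw [PySem.List.pyRange_one_eq_nil (by omega)]
    rw [Finset.Ico_eq_empty (by omega)]
    simp [h0, h1]
  | succ k ih =>
    intro a b s hk h0 h1
    by_cases hab : a < b
    · rw [PySem.List.pyRange_one_cons hab]
      simp only [List.foldl_cons]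
      rw [prodIco_cons a b hab]
      by_cases hc : a % 2 ≠ 0 ∧ a % 5 ≠ 0
      · rw [if_pos hc]
        obtain ⟨hb, hcast⟩ := ih (a + 1) b ((s * (a % 1000)) % 1000) (by omega)
          (Int.emod_nonneg _ (by norm_num)) (Int.emod_lt_of_pos _ (by norm_num))
        refine ⟨hb, ?_⟩
        rw [hcast, castmod]
        have hu : uterm a = (a : ZMod 1000) := by unfold uterm; rw [if_pos hc]
        rw [hu]; push_cast [castmod]; ring
      · rw [if_neg hc]
        obtain ⟨hb, hcast⟩ := ih (a + 1) b s (by omega) h0 h1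
        refine ⟨hb, ?_⟩
        rw [hcast]
        have hu : uterm a = 1 := by unfold uterm; rw [if_neg hc]
        rw [hu]; ring
    · rw [PySem.List.pyRange_one_eq_nil (by omega)]
      rw [Finset.Ico_eq_empty (by omega)]
      simp [h0, h1]

-- _U(a,b) computes UU a b, the coprime-to-10 partial product over [a, b]
lemma altU_spec (a b : Int) :
    (0 ≤ altU a b ∧ altU a b < 1000) ∧ ((altU a b : Int) : ZMod 1000) = UU a b := by
  have hbody : (fun (r i : Int) =>
        if PySem.Int.mod i 2 ≠ 0 ∧ PySem.Int.mod i 5 ≠ 0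
        then PySem.Int.mod (r * PySem.Int.mod i 1000) 1000 else r) =
      (fun (r i : Int) => if i % 2 ≠ 0 ∧ i % 5 ≠ 0 then (r * (i % 1000)) % 1000 else r) := by
    funext r i
    rw [PySem.Int.mod_eq_emod_of_pos (b := 2) (by norm_num),
      PySem.Int.mod_eq_emod_of_pos (b := 5) (by norm_num),
      PySem.Int.mod_eq_emod_of_pos (b := 1000) (by norm_num),
      PySem.Int.mod_eq_emod_of_pos (b := 1000) (by norm_num)]
  unfold altU UU
  by_cases hL : b - a + 1 ≤ 0
  · rw [if_pos hL, Finset.Ico_eq_empty (by omega)]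
    norm_num
  · rw [if_neg hL, hbody]
    have hm : PySem.Int.mod (b - a + 1) 1000 = (b - a + 1) % 1000 :=
      PySem.Int.mod_eq_emod_of_pos (by norm_num)
    by_cases hB : 1000 ≤ b - a + 1
    · rw [if_pos hB, hm]
      set b' := a + (b - a + 1) % 1000 - 1 with hb'
      obtain ⟨hb, hcast⟩ := foldU_aux ((b' + 1) - a).toNat a (b' + 1) 1 le_rfl (by norm_num) (by norm_num)
      refine ⟨hb, ?_⟩
      rw [hcast]
      have hsplit := prodIco_split a (b' + 1) (b + 1) (by omega) (by omega) uterm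
      have hblocks : ∏ i ∈ Finset.Ico (b' + 1) (b + 1), uterm i = 1 := by
        have he : b + 1 = (b' + 1) + 1000 * ((((b - a + 1) / 1000) : Int).toNat : Int) := by omega
        rw [he]
        exact blocks _ (b' + 1)
      rw [← hsplit, hblocks]
      ring
    · rw [if_neg hB]
      obtain ⟨hb, hcast⟩ := foldU_aux ((b + 1) - a).toNat a (b + 1) 1 le_rfl (by norm_num) (by norm_num)
      refine ⟨hb, ?_⟩
      rw [hcast]; ring

-- ===== arithmetic facts about remove2 / remove5 / redN =====
lemma remove2_odd (m : Nat) (h : m % 2 ≠ 0) : remove2 m = m := by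
  rw [remove2]; simp [h]

lemma remove5_non5 (m : Nat) (h : m % 5 ≠ 0) : remove5 m = m := by
  rw [remove5]; simp [h]

lemma remove2_two (m : Nat) (h : m ≠ 0) : remove2 (2 * m) = remove2 m := by
  rw [remove2]
  have : (2 * m) / 2 = m := by omega
  simp [this, h, Nat.mul_mod_right]

lemma remove5_five (m : Nat) (h : m ≠ 0) : remove5 (5 * m) = remove5 m := by
  rw [remove5]
  have : (5 * m) / 5 = m := by omega
  simp [this, h, Nat.mul_mod_right]

lemma redN_two (m : Nat) (h : m ≠ 0) : redN (2 * m) = redN m := by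
  unfold redN; rw [remove2_two m h]

lemma redN_five_odd (m : Nat) (h : m % 2 = 1) : redN (5 * m) = redN m := by
  unfold redN
  rw [remove2_odd (5 * m) (by omega), remove5_five m (by omega), remove2_odd m (by omega)]

lemma redN_coprime (m : Nat) (h2 : m % 2 ≠ 0) (h5 : m % 5 ≠ 0) : redN m = m := by
  unfold redN; rw [remove2_odd m h2, remove5_non5 m h5]

-- ===== redZ lemmas =====
lemma redZ_two (j : Int) (h : j ≠ 0) : redZ (2 * j) = redZ j := by
  unfold redZ
  rcases lt_trichotomy j 0 with hj | hj | hj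
  · rw [if_neg (by omega), if_neg (by omega)]
    have : (-(2 * j)).toNat = 2 * (-j).toNat := by omega
    rw [this, redN_two _ (by omega)]
  · omega
  · rw [if_pos (by omega), if_pos (by omega)]
    have : (2 * j).toNat = 2 * j.toNat := by omega
    rw [this, redN_two _ (by omega)]

lemma redZ_five_odd (j : Int) (h : j % 2 ≠ 0) : redZ (5 * j) = redZ j := by
  unfold redZ
  rcases lt_trichotomy j 0 with hj | hj | hj
  · rw [if_neg (by omega), if_neg (by omega)]
    have : (-(5 * j)).toNat = 5 * (-j).toNat := by omega
    rw [this, redN_five_odd _ (by omega)]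
  · omega
  · rw [if_pos (by omega), if_pos (by omega)]
    have : (5 * j).toNat = 5 * j.toNat := by omega
    rw [this, redN_five_odd _ (by omega)]

lemma redZ_coprime (i : Int) (h2 : i % 2 ≠ 0) (h5 : i % 5 ≠ 0) : redZ i = (i : ZMod 1000) := by
  unfold redZ
  rcases lt_trichotomy i 0 with hi | hi | hi
  · rw [if_neg (by omega), redN_coprime _ (by omega) (by omega)]
    have : (((-i).toNat : Nat) : ZMod 1000) = ((-i : Int) : ZMod 1000) := by
      rw [show ((-i).toNat : Nat) = (-i).toNat from rfl, ← Int.cast_natCast,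
        Int.toNat_of_nonneg (by omega)]
    rw [this]; push_cast; ring
  · omega
  · rw [if_pos (by omega), redN_coprime _ (by omega) (by omega), ← Int.cast_natCast,
      Int.toNat_of_nonneg (by omega)]

-- ===== strip2/strip5 compute ±remove2/±remove5 =====
lemma strip2_pos : ∀ (m : Nat), m ≠ 0 → strip2 ((m : Nat) : Int) = ((remove2 m : Nat) : Int) := by
  intro m
  induction m using Nat.strong_induction_on with
  | _ m ih =>
    intro hm
    rw [strip2, remove2]
    by_cases he : m % 2 = 0
    · rw [dif_pos ⟨by omega, by
          rw [PySem.Int.mod_eq_emod_of_pos (by norm_num)]; omega⟩, dif_pos ⟨hm, he⟩]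
      rw [PySem.Int.floordiv_eq_ediv_of_pos (by norm_num)]
      rw [show ((m : Nat) : Int) / 2 = (((m / 2 : Nat) : Nat) : Int) by omega]
      exact ih (m / 2) (by omega) (by omega)
    · rw [dif_neg (by
          rw [PySem.Int.mod_eq_emod_of_pos (by norm_num)]
          intro ⟨_, hc⟩; omega), dif_neg (by intro ⟨_, hc⟩; omega)]

lemma strip2_neg : ∀ (m : Nat), m ≠ 0 → strip2 (-((m : Nat) : Int)) = -((remove2 m : Nat) : Int) := by
  intro m
  induction m using Nat.strong_induction_on with
  | _ m ih =>
    intro hm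
    rw [strip2, remove2]
    by_cases he : m % 2 = 0
    · rw [dif_pos ⟨by omega, by
          rw [PySem.Int.mod_eq_emod_of_pos (by norm_num)]; omega⟩, dif_pos ⟨hm, he⟩]
      rw [PySem.Int.floordiv_eq_ediv_of_pos (by norm_num)]
      rw [show (-((m : Nat) : Int)) / 2 = -(((m / 2 : Nat) : Nat) : Int) by omega]
      exact ih (m / 2) (by omega) (by omega)
    · rw [dif_neg (by
          rw [PySem.Int.mod_eq_emod_of_pos (by norm_num)]
          intro ⟨_, hc⟩; omega), dif_neg (by intro ⟨_, hc⟩; omega)]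

lemma strip5_pos : ∀ (m : Nat), m ≠ 0 → strip5 ((m : Nat) : Int) = ((remove5 m : Nat) : Int) := by
  intro m
  induction m using Nat.strong_induction_on with
  | _ m ih =>
    intro hm
    rw [strip5, remove5]
    by_cases he : m % 5 = 0
    · rw [dif_pos ⟨by omega, by
          rw [PySem.Int.mod_eq_emod_of_pos (by norm_num)]; omega⟩, dif_pos ⟨hm, he⟩]
      rw [PySem.Int.floordiv_eq_ediv_of_pos (by norm_num)]
      rw [show ((m : Nat) : Int) / 5 = (((m / 5 : Nat) : Nat) : Int) by omega]
      exact ih (m / 5) (by omega) (by omega)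
    · rw [dif_neg (by
          rw [PySem.Int.mod_eq_emod_of_pos (by norm_num)]
          intro ⟨_, hc⟩; omega), dif_neg (by intro ⟨_, hc⟩; omega)]

lemma strip5_neg : ∀ (m : Nat), m ≠ 0 → strip5 (-((m : Nat) : Int)) = -((remove5 m : Nat) : Int) := by
  intro m
  induction m using Nat.strong_induction_on with
  | _ m ih =>
    intro hm
    rw [strip5, remove5]
    by_cases he : m % 5 = 0
    · rw [dif_pos ⟨by omega, by
          rw [PySem.Int.mod_eq_emod_of_pos (by norm_num)]; omega⟩, dif_pos ⟨hm, he⟩]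
      rw [PySem.Int.floordiv_eq_ediv_of_pos (by norm_num)]
      rw [show (-((m : Nat) : Int)) / 5 = -(((m / 5 : Nat) : Nat) : Int) by omega]
      exact ih (m / 5) (by omega) (by omega)
    · rw [dif_neg (by
          rw [PySem.Int.mod_eq_emod_of_pos (by norm_num)]
          intro ⟨_, hc⟩; omega), dif_neg (by intro ⟨_, hc⟩; omega)]

lemma remove2_ne_zero : ∀ (m : Nat), m ≠ 0 → remove2 m ≠ 0 := by
  intro m
  induction m using Nat.strong_induction_on with
  | _ m ih =>
    intro hm
    rw [remove2]
    by_cases he : m % 2 = 0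
    · rw [dif_pos ⟨hm, he⟩]; exact ih (m / 2) (by omega) (by omega)
    · rw [dif_neg (by intro ⟨_, hc⟩; omega)]; exact hm

-- the two while loops compute redZ i (as a residue)
lemma strip_bridge (i : Int) (h : i ≠ 0) :
    ((PySem.Int.mod (strip5 (strip2 i)) 1000 : Int) : ZMod 1000) = redZ i := by
  rw [PySem.Int.mod_eq_emod_of_pos (by norm_num), castmod]
  unfold redZ redN
  rcases lt_trichotomy i 0 with hi | hi | hi
  · rw [if_neg (by omega)]
    have h2 : strip2 i = -((remove2 (-i).toNat : Nat) : Int) := by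
      have := strip2_neg (-i).toNat (by omega)
      rw [show (((-i).toNat : Nat) : Int) = -i by omega, neg_neg] at this
      exact this
    rw [h2]
    have h5 := strip5_neg (remove2 (-i).toNat) (remove2_ne_zero _ (by omega))
    rw [h5]
    push_cast
    ring
  · exact absurd hi (by omega)
  · rw [if_pos (by omega)]
    have h2 : strip2 i = ((remove2 i.toNat : Nat) : Int) := by
      have := strip2_pos i.toNat (by omega)
      rw [show ((i.toNat : Nat) : Int) = i by omega] at this
      exact this
    rw [h2]
    have h5 := strip5_pos (remove2 i.toNat) (remove2_ne_zero _ (by omega))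
    rw [h5]
    push_cast
    ring

-- ===== the three-way split of the interval product =====
lemma prod_even (a b : Int) (hok : 1 ≤ a ∨ b ≤ -1) :
    ∏ i ∈ Finset.Ico a (b + 1), (if i % 2 = 0 then redZ i else 1) =
      ∏ j ∈ Finset.Ico ((a + 1) / 2) (b / 2 + 1), redZ j := by
  rw [← Finset.prod_filter (fun i => i % 2 = 0) redZ]
  refine Finset.prod_nbij' (fun i => i / 2) (fun j => 2 * j) ?_ ?_ ?_ ?_ ?_
  · intro i hi; simp only [Finset.mem_filter, Finset.mem_Ico] at *; omega
  · intro j hj; simp only [Finset.mem_filter, Finset.mem_Ico] at *; omega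
  · intro i hi; simp only [Finset.mem_filter, Finset.mem_Ico] at hi
    show 2 * (i / 2) = i; omega
  · intro j hj; simp only [Finset.mem_Ico] at hj
    show 2 * j / 2 = j; omega
  · intro i hi; simp only [Finset.mem_filter, Finset.mem_Ico] at hi
    have hj : i / 2 ≠ 0 := by omega
    have h2 : (2 : Int) * (i / 2) = i := by omega
    conv_lhs => rw [← h2]
    exact redZ_two _ hj

lemma prod_odd5 (a b : Int) :
    ∏ i ∈ Finset.Ico a (b + 1), (if i % 2 ≠ 0 ∧ i % 5 = 0 then redZ i else 1) =
      ∏ j ∈ Finset.Ico ((a + 4) / 5) (b / 5 + 1), (if j % 2 ≠ 0 then redZ j else 1) := by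
  rw [← Finset.prod_filter (fun i => i % 2 ≠ 0 ∧ i % 5 = 0) redZ,
    ← Finset.prod_filter (fun j => j % 2 ≠ 0) redZ]
  refine Finset.prod_nbij' (fun i => i / 5) (fun j => 5 * j) ?_ ?_ ?_ ?_ ?_
  · intro i hi; simp only [Finset.mem_filter, Finset.mem_Ico] at *; omega
  · intro j hj; simp only [Finset.mem_filter, Finset.mem_Ico] at *; omega
  · intro i hi; simp only [Finset.mem_filter, Finset.mem_Ico] at hi
    show 5 * (i / 5) = i; omega
  · intro j hj; simp only [Finset.mem_filter, Finset.mem_Ico] at hj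
    show 5 * j / 5 = j; omega
  · intro i hi; simp only [Finset.mem_filter, Finset.mem_Ico] at hi
    have hj : (i / 5) % 2 ≠ 0 := by omega
    have h5 : (5 : Int) * (i / 5) = i := by omega
    conv_lhs => rw [← h5]
    exact redZ_five_odd _ hj

lemma HH_rec (a b : Int) :
    HH a b = UU a b * HH ((a + 4) / 5) (b / 5) := by
  unfold HH UU
  have hsplit : ∀ i ∈ Finset.Ico a (b + 1), (if i % 2 ≠ 0 then redZ i else 1) =
      uterm i * (if i % 2 ≠ 0 ∧ i % 5 = 0 then redZ i else 1) := by
    intro i hi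
    simp only [Finset.mem_Ico] at hi
    unfold uterm
    by_cases h2 : i % 2 = 0
    · simp [h2]
    · by_cases h5 : i % 5 = 0
      · simp [h2, h5]
      · simp [h2, h5, redZ_coprime i h2 h5]
  rw [Finset.prod_congr rfl hsplit, Finset.prod_mul_distrib, prod_odd5 a b]

lemma GG_rec (a b : Int) (hok : 1 ≤ a ∨ b ≤ -1) :
    GG a b = UU a b * HH ((a + 4) / 5) (b / 5) * GG ((a + 1) / 2) (b / 2) := by
  unfold GG UU HH
  have hsplit : ∀ i ∈ Finset.Ico a (b + 1), redZ i =
      uterm i * (if i % 2 ≠ 0 ∧ i % 5 = 0 then redZ i else 1) *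
        (if i % 2 = 0 then redZ i else 1) := by
    intro i hi
    simp only [Finset.mem_Ico] at hi
    unfold uterm
    by_cases h2 : i % 2 = 0
    · simp [h2]
    · by_cases h5 : i % 5 = 0
      · simp [h2, h5]
      · simp [h2, h5, redZ_coprime i h2 h5]
  rw [Finset.prod_congr rfl hsplit, Finset.prod_mul_distrib, Finset.prod_mul_distrib,
    prod_odd5 a b, prod_even a b hok]

-- ===== B's loops =====
lemma altLoop5_spec : ∀ (f : Nat) (x y r : Int), x.natAbs + y.natAbs < f →
    (1 ≤ x ∨ y ≤ -1) → 0 ≤ r → r < 1000 →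
    (0 ≤ altLoop5 f x y r ∧ altLoop5 f x y r < 1000) ∧
      ((altLoop5 f x y r : Int) : ZMod 1000) = (r : ZMod 1000) * HH x y := by
  intro f
  induction f with
  | zero => intro x y r hf; exact absurd hf (by omega)
  | succ f ih =>
    intro x y r hf hok h0 h1
    rw [altLoop5]
    by_cases hxy : x ≤ y
    · rw [if_pos hxy]
      rw [PySem.Int.floordiv_eq_ediv_of_pos (b := 5) (by norm_num),
        PySem.Int.floordiv_eq_ediv_of_pos (b := 5) (by norm_num)]
      have hm : PySem.Int.mod (r * altU x y) 1000 = (r * altU x y) % 1000 :=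
        PySem.Int.mod_eq_emod_of_pos (by norm_num)
      obtain ⟨hb, hcast⟩ := ih ((x + 4) / 5) (y / 5) (PySem.Int.mod (r * altU x y) 1000)
        (by omega) (by omega) (by rw [hm]; exact Int.emod_nonneg _ (by norm_num))
        (by rw [hm]; exact Int.emod_lt_of_pos _ (by norm_num))
      refine ⟨hb, ?_⟩
      rw [hcast, hm, castmod]
      push_cast
      rw [(altU_spec x y).2, HH_rec x y]
      ring
    · rw [if_neg hxy]
      refine ⟨⟨h0, h1⟩, ?_⟩
      unfold HH
      rw [Finset.Ico_eq_empty (by omega)]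
      simp

lemma altLoop2_spec : ∀ (f : Nat) (a b r : Int), a.natAbs + b.natAbs < f →
    (1 ≤ a ∨ b ≤ -1) → 0 ≤ r → r < 1000 →
    (0 ≤ altLoop2 f a b r ∧ altLoop2 f a b r < 1000) ∧
      ((altLoop2 f a b r : Int) : ZMod 1000) = (r : ZMod 1000) * GG a b := by
  intro f
  induction f with
  | zero => intro a b r hf; exact absurd hf (by omega)
  | succ f ih =>
    intro a b r hf hok h0 h1
    rw [altLoop2]
    by_cases hab : a ≤ b
    · rw [if_pos hab]
      rw [PySem.Int.floordiv_eq_ediv_of_pos (b := 5) (by norm_num),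
        PySem.Int.floordiv_eq_ediv_of_pos (b := 5) (by norm_num),
        PySem.Int.floordiv_eq_ediv_of_pos (b := 2) (by norm_num),
        PySem.Int.floordiv_eq_ediv_of_pos (b := 2) (by norm_num)]
      have hm : PySem.Int.mod (r * altU a b) 1000 = (r * altU a b) % 1000 :=
        PySem.Int.mod_eq_emod_of_pos (by norm_num)
      obtain ⟨hb5, hcast5⟩ := altLoop5_spec f ((a + 4) / 5) (b / 5)
        (PySem.Int.mod (r * altU a b) 1000)
        (by omega) (by omega) (by rw [hm]; exact Int.emod_nonneg _ (by norm_num))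
        (by rw [hm]; exact Int.emod_lt_of_pos _ (by norm_num))
      obtain ⟨hb2, hcast2⟩ := ih ((a + 1) / 2) (b / 2) _ (by omega) (by omega) hb5.1 hb5.2
      refine ⟨hb2, ?_⟩
      rw [hcast2, hcast5, hm, castmod]
      push_cast
      rw [(altU_spec a b).2, GG_rec a b hok]
      ring
    · rw [if_neg hab]
      refine ⟨⟨h0, h1⟩, ?_⟩
      unfold GG
      rw [Finset.Ico_eq_empty (by omega)]
      simp

-- table entries are three-digit
lemma table_bound (q : Int) :
    0 ≤ (PySem.List.pyGet? pyPrecomputed q).getD 0 ∧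
      (PySem.List.pyGet? pyPrecomputed q).getD 0 < 1000 := by
  rcases h : PySem.List.pyGet? pyPrecomputed q with _ | x
  · simp
  · have hx := PySem.List.mem_of_pyGet?_eq_some (h := h)
    simp only [Option.getD_some]
    simp only [pyPrecomputed, List.mem_cons, List.not_mem_nil, or_false] at hx
    rcases hx with h' | h' | h' | h' | h' | h' | h' | h' | h' | h' | h' <;> omega

lemma alt_spec (n : Int) :
    (0 ≤ three_digits_omit25_alt n ∧ three_digits_omit25_alt n < 1000) ∧
      ((three_digits_omit25_alt n : Int) : ZMod 1000) =
        (((PySem.List.pyGet? pyPrecomputed (PySem.Int.floordiv n 1000000)).getD 0 : Int) : ZMod 1000) *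
          GG (PySem.Int.floordiv n 1000000 * 1000000 + 1) n := by
  unfold three_digits_omit25_alt
  obtain ⟨ht0, ht1⟩ := table_bound (PySem.Int.floordiv n 1000000)
  have hq : PySem.Int.floordiv n 1000000 = n / 1000000 :=
    PySem.Int.floordiv_eq_ediv_of_pos (by norm_num)
  exact altLoop2_spec (2 * n.natAbs + 1000003) (PySem.Int.floordiv n 1000000 * 1000000 + 1) n
    ((PySem.List.pyGet? pyPrecomputed (PySem.Int.floordiv n 1000000)).getD 0)
    (by rw [hq]; omega)
    (by rw [hq]
        by_cases h : 0 ≤ n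
        · left; have : 0 ≤ n / 1000000 := by omega
          omega
        · right; omega) ht0 ht1

-- ===== A's loop (stated over emod; the port's PySem.Int.mod form is bridged in A_spec) =====
lemma foldA_aux (limit : Int) : ∀ (k : Nat) (a b s : Int), (b - a).toNat ≤ k → 0 ≤ s → s < 1000 →
    (0 ≤ (PySem.List.pyRange a b 1).foldl
        (fun acc i =>
          if i % 2 ≠ 0 ∧ i % 5 ≠ 0 ∧ i < limit then acc
          else (acc * (strip5 (strip2 i) % 1000)) % 1000) s ∧
      (PySem.List.pyRange a b 1).foldl
        (fun acc i =>
          if i % 2 ≠ 0 ∧ i % 5 ≠ 0 ∧ i < limit then acc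
          else (acc * (strip5 (strip2 i) % 1000)) % 1000) s < 1000) ∧
    (((PySem.List.pyRange a b 1).foldl
        (fun acc i =>
          if i % 2 ≠ 0 ∧ i % 5 ≠ 0 ∧ i < limit then acc
          else (acc * (strip5 (strip2 i) % 1000)) % 1000) s : Int) : ZMod 1000) =
      (s : ZMod 1000) *
        ∏ i ∈ Finset.Ico a b,
          (if i % 2 ≠ 0 ∧ i % 5 ≠ 0 ∧ i < limit then 1
           else ((strip5 (strip2 i) % 1000 : Int) : ZMod 1000)) := by
  intro k
  induction k with
  | zero =>
    intro a b s hk h0 h1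
    rw [PySem.List.pyRange_one_eq_nil (by omega)]
    rw [Finset.Ico_eq_empty (by omega)]
    simp [h0, h1]
  | succ k ih =>
    intro a b s hk h0 h1
    by_cases hab : a < b
    · rw [PySem.List.pyRange_one_cons hab]
      simp only [List.foldl_cons]
      rw [prodIco_cons a b hab]
      by_cases hc : a % 2 ≠ 0 ∧ a % 5 ≠ 0 ∧ a < limit
      · rw [if_pos hc, if_pos hc]
        obtain ⟨hb, hcast⟩ := ih (a + 1) b s (by omega) h0 h1
        refine ⟨hb, ?_⟩
        rw [hcast]; ring
      · rw [if_neg hc, if_neg hc]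
        obtain ⟨hb, hcast⟩ := ih (a + 1) b ((s * (strip5 (strip2 a) % 1000)) % 1000) (by omega)
          (Int.emod_nonneg _ (by norm_num)) (Int.emod_lt_of_pos _ (by norm_num))
        refine ⟨hb, ?_⟩
        rw [hcast, castmod]
        push_cast
        ring
    · rw [PySem.List.pyRange_one_eq_nil (by omega)]
      rw [Finset.Ico_eq_empty (by omega)]
      simp [h0, h1]

-- skipped coprime factors in [lo, limit) multiply to 1, so A's partial product is GG lo n
lemma skip_cancel (lo limit n : Int) (hlo : lo % 1000 = 1) (hlim : limit % 1000 = 0)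
    (hln : limit ≤ n) (hok : 1 ≤ lo ∨ n ≤ -1) :
    ∏ i ∈ Finset.Ico lo (n + 1),
        (if i % 2 ≠ 0 ∧ i % 5 ≠ 0 ∧ i < limit then 1
         else ((strip5 (strip2 i) % 1000 : Int) : ZMod 1000)) = GG lo n := by
  have hGG : GG lo n =
      (∏ i ∈ Finset.Ico lo (n + 1),
        (if i % 2 ≠ 0 ∧ i % 5 ≠ 0 ∧ i < limit then 1
         else ((strip5 (strip2 i) % 1000 : Int) : ZMod 1000))) *
      ∏ i ∈ Finset.Ico lo (n + 1),
        (if i % 2 ≠ 0 ∧ i % 5 ≠ 0 ∧ i < limit then (i : ZMod 1000) else 1) := by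
    unfold GG
    rw [← Finset.prod_mul_distrib]
    refine Finset.prod_congr rfl ?_
    intro i hi
    simp only [Finset.mem_Ico] at hi
    have hi0 : i ≠ 0 := by omega
    by_cases hc : i % 2 ≠ 0 ∧ i % 5 ≠ 0 ∧ i < limit
    · rw [if_pos hc, if_pos hc, redZ_coprime i hc.1 hc.2.1]
      ring
    · rw [if_neg hc, if_neg hc]
      have hb := strip_bridge i hi0
      rw [PySem.Int.mod_eq_emod_of_pos (by norm_num)] at hb
      rw [hb]
      ring
  have hS : ∏ i ∈ Finset.Ico lo (n + 1),
      (if i % 2 ≠ 0 ∧ i % 5 ≠ 0 ∧ i < limit then (i : ZMod 1000) else 1) = 1 := by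
    by_cases hll : limit ≤ lo
    · refine Finset.prod_eq_one ?_
      intro i hi
      simp only [Finset.mem_Ico] at hi
      rw [if_neg (by intro ⟨_, _, hlt⟩; omega)]
    · rw [← prodIco_split lo limit (n + 1) (by omega) (by omega)]
      have h2 : ∏ i ∈ Finset.Ico limit (n + 1),
          (if i % 2 ≠ 0 ∧ i % 5 ≠ 0 ∧ i < limit then (i : ZMod 1000) else 1) = 1 := by
        refine Finset.prod_eq_one ?_
        intro i hi
        simp only [Finset.mem_Ico] at hi
        rw [if_neg (by intro ⟨_, _, hlt⟩; omega)]
      have h1 : ∏ i ∈ Finset.Ico lo limit,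
          (if i % 2 ≠ 0 ∧ i % 5 ≠ 0 ∧ i < limit then (i : ZMod 1000) else 1) =
          ∏ i ∈ Finset.Ico lo limit, uterm i := by
        refine Finset.prod_congr rfl ?_
        intro i hi
        simp only [Finset.mem_Ico] at hi
        unfold uterm
        by_cases hc : i % 2 ≠ 0 ∧ i % 5 ≠ 0
        · rw [if_pos ⟨hc.1, hc.2, by omega⟩, if_pos hc]
        · rw [if_neg (by intro ⟨u1, u2, _⟩; exact hc ⟨u1, u2⟩), if_neg hc]
      have hone : ∏ i ∈ Finset.Ico lo (limit + 1), uterm i = 1 := by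
        have he : limit + 1 = lo + 1000 * ((((limit + 1 - lo) / 1000) : Int).toNat : Int) := by
          omega
        rw [he]
        exact blocks _ lo
      have hsplit := prodIco_split lo limit (limit + 1) (by omega) (by omega) uterm
      have hlast : ∏ i ∈ Finset.Ico limit (limit + 1), uterm i = uterm limit := by
        rw [show Finset.Ico limit (limit + 1) = {limit} by
          ext x; simp only [Finset.mem_Ico, Finset.mem_singleton]; omega]
        simp
      have hu : uterm limit = 1 := by
        unfold uterm
        rw [if_neg (by intro ⟨hc, _⟩; omega)]
      rw [hlast, hu, mul_one] at hsplit
      rw [h1, h2, hsplit, hone, mul_one]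
  rw [hGG, hS, mul_one]

lemma A_spec (n : Int) (hpre : Pre_three_digits_omit25 n) :
    (0 ≤ three_digits_omit25 n ∧ three_digits_omit25 n < 1000) ∧
      ((three_digits_omit25 n : Int) : ZMod 1000) =
        (((PySem.List.pyGet? pyPrecomputed (PySem.Int.floordiv n 1000000)).getD 0 : Int) : ZMod 1000) *
          GG (PySem.Int.floordiv n 1000000 * 1000000 + 1) n := by
  obtain ⟨hpre1, hpre2⟩ := hpre
  have hq : PySem.Int.floordiv n 1000000 = n / 1000000 :=
    PySem.Int.floordiv_eq_ediv_of_pos (by norm_num)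
  have hmn : PySem.Int.mod n 1000 = n % 1000 := PySem.Int.mod_eq_emod_of_pos (by norm_num)
  have hbody : (fun (acc i : Int) =>
        if PySem.Int.mod i 2 ≠ 0 ∧ PySem.Int.mod i 5 ≠ 0 ∧ i < n - n % 1000 then acc
        else PySem.Int.mod (acc * PySem.Int.mod (strip5 (strip2 i)) 1000) 1000) =
      (fun (acc i : Int) =>
        if i % 2 ≠ 0 ∧ i % 5 ≠ 0 ∧ i < n - n % 1000 then acc
        else (acc * (strip5 (strip2 i) % 1000)) % 1000) := by
    funext acc i
    rw [PySem.Int.mod_eq_emod_of_pos (a := i) (b := 2) (by norm_num),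
      PySem.Int.mod_eq_emod_of_pos (a := i) (b := 5) (by norm_num),
      PySem.Int.mod_eq_emod_of_pos (a := strip5 (strip2 i)) (b := 1000) (by norm_num),
      PySem.Int.mod_eq_emod_of_pos (a := acc * (strip5 (strip2 i) % 1000)) (b := 1000)
        (by norm_num)]
  unfold three_digits_omit25
  simp only [hmn]
  rw [hbody]
  obtain ⟨ht0, ht1⟩ := table_bound (PySem.Int.floordiv n 1000000)
  set q := PySem.Int.floordiv n 1000000 with hqdef
  set lo := q * 1000000 + 1 with hlodef
  have hql : q = n / 1000000 := hq
  obtain ⟨hb, hcast⟩ := foldA_aux (n - n % 1000) ((n + 1 - lo).toNat) lo (n + 1)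
    ((PySem.List.pyGet? pyPrecomputed q).getD 0) le_rfl ht0 ht1
  refine ⟨hb, ?_⟩
  rw [hcast, skip_cancel lo (n - n % 1000) n (by omega) (by omega) (by omega)
    (by by_cases h : 0 ≤ n
        · left; have : 0 ≤ n / 1000000 := by omega
          omega
        · right; omega)]

-- ===== VERDICT (by name: the statement is the Claim_ definition above) =====
theorem three_digits_omit25_spec : Claim_equal_three_digits_omit25 := by
  intro n _hdom hpre
  unfold Spec_three_digits_omit25
  obtain ⟨⟨ha0, ha1⟩, hacast⟩ := A_spec n hpre
  obtain ⟨⟨hb0, hb1⟩, hbcast⟩ := alt_spec n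
  exact int_eq_of_cast_eq ha0 ha1 hb0 hb1 (by rw [hacast, hbcast])
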